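-- pv_equiv track=rewrite | github.com/datashaman/code-skills | skills/audit-docs/scripts/scan_docs.py | _strip_trailing_php_attribute
-- ===== SOURCE A (Python) =====
-- def _strip_trailing_php_attribute(head: str) -> str | None:
--     """Return `head` with a trailing `#[...]` attribute removed, or None.
--
--     Walks back from the final `]`, tracking bracket depth so that
--     multi-line attributes (e.g. `#[Foo([\n  'a', 'b',\n])]`) are
--     consumed as a unit.
--     """
--     if not head.endswith("]"):
--         return None
--     depth = 0
--     for i in range(len(head) - 1, -1, -1):
--         c = head[i]
--         if c == "]":
--             depth += 1
--         elif c == "[":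
--             depth -= 1
--             if depth == 0:
--                 if i > 0 and head[i - 1] == "#":
--                     return head[: i - 1]
--                 return None
--     return None
-- ===== SOURCE B (Python) =====
-- def _strip_trailing_php_attribute(head: str) -> str | None:
--     """Return `head` with a trailing `#[...]` attribute removed, or None.
--
--     Single forward pass: keep, for each running prefix balance value, the
--     index of the last '[' seen at that balance.  The opener matching the
--     final ']' is the last '[' whose prefix balance equals the balance
--     after the whole string.
--     """
--     if not head.endswith("]"):
--         return None
--     last_open = {}
--     bal = 0
--     for i, c in enumerate(head):
--         if c == "[":
--             last_open[bal] = i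
--             bal += 1
--         elif c == "]":
--             bal -= 1
--     i = last_open.get(bal)
--     if i is None:
--         return None
--     if i > 0 and head[i - 1] == "#":
--         return head[: i - 1]
--     return None
-- ===== Notes on version B (the rewrite author's own statement) =====
-- stated objective: alternative
-- what changed: A walks backward from the end tracking bracket depth; B makes one forward pass that records, per running prefix-balance value, the index of the last opening bracket seen at that balance, and finds the matching opener by a single dictionary lookup at the final balance.
import Mathlib
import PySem

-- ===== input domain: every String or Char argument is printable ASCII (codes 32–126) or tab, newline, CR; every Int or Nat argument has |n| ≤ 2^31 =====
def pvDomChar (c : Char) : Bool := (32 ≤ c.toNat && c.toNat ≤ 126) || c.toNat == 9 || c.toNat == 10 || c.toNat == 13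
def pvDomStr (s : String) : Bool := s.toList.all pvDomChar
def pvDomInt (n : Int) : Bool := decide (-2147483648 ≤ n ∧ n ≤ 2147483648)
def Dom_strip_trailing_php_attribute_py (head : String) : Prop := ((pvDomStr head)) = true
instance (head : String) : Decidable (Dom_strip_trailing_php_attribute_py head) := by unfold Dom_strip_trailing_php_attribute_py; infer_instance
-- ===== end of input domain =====

-- B replaces A's backward depth-tracking scan by a single forward pass that indexes,
-- per running prefix balance, the last '[' seen at that balance (objective: alternative).

-- ===== PORT A =====
-- A's backward loop 'for i in range(len(head)-1, -1, -1)' as recursion on the index i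
def pvLoopA (cs : List Char) (i : Nat) (depth : Int) : Option String :=
  let c := cs.getD i ' '
  if c = ']' then
    if i = 0 then none else pvLoopA cs (i - 1) (depth + 1)
  else if c = '[' then
    if depth - 1 = 0 then
      if 0 < i ∧ cs.getD (i - 1) ' ' = '#' then some (String.ofList (cs.take (i - 1)))
      else none
    else if i = 0 then none else pvLoopA cs (i - 1) (depth - 1)
  else
    if i = 0 then none else pvLoopA cs (i - 1) depth
termination_by i
decreasing_by all_goals omega

def strip_trailing_php_attribute_py (head : String) : Option String :=
  if PySem.Str.endswith head "]" then
    -- range(len(head)-1, -1, -1) is empty iff the string is empty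
    if head.toList.length = 0 then none else pvLoopA head.toList (head.toList.length - 1) 0
  else none

-- ===== PORT B =====
-- the body of Source B's for-loop; state = (last_open, bal)
def pvStepB (acc : PySem.Dict Int Int × Int) (p : Int × Char) : PySem.Dict Int Int × Int :=
  if p.2 = '[' then (acc.1.insert acc.2 p.1, acc.2 + 1)
  else if p.2 = ']' then (acc.1, acc.2 - 1)
  else acc

-- the return statements after Source B's loop, on the loop's final state
def pvFinishB (cs : List Char) (st : PySem.Dict Int Int × Int) : Option String :=
  match st.1.get? st.2 with
  | none => none
  | some i =>
    if 0 < i ∧ PySem.List.pyGetD cs (i - 1) ' ' = '#' then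
      some (String.ofList (PySem.List.slice cs none (some (i - 1))))
    else none

def strip_trailing_php_attribute_py_alt (head : String) : Option String :=
  if PySem.Str.endswith head "]" then
    pvFinishB head.toList ((PySem.List.enumerate head.toList 0).foldl pvStepB (PySem.Dict.empty, 0))
  else none

-- ===== PRECONDITION & SPEC =====
def Spec_strip_trailing_php_attribute_py (head : String) (out : Option String) : Prop := out = strip_trailing_php_attribute_py_alt head
instance (head : String) (out : Option String) : Decidable (Spec_strip_trailing_php_attribute_py head out) := by unfold Spec_strip_trailing_php_attribute_py; infer_instance

-- ===== CLAIM (what is proved, stated in full; the proofs are below) =====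
def Claim_equal_strip_trailing_php_attribute_py : Prop := ∀ (head : String), Dom_strip_trailing_php_attribute_py head → Spec_strip_trailing_php_attribute_py head (strip_trailing_php_attribute_py head)

-- ===== LEMMAS AND PROOFS =====

-- bracket balance of a list of characters: #'[' − #']'
def pvBal : List Char → Int
  | [] => 0
  | c :: t => (if c = '[' then 1 else if c = ']' then -1 else 0) + pvBal t

lemma pvBal_append (l1 l2 : List Char) : pvBal (l1 ++ l2) = pvBal l1 + pvBal l2 := by
  induction l1 with
  | nil => simp [pvBal]
  | cons c t ih => simp [pvBal, ih]; ring

-- the opener the final ']' matches: an index j with cs[j] = '[' whose prefix balance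
-- equals the balance of the whole string (both programs pick the LARGEST such j)
def pvPred (cs : List Char) (v : Int) (j : Nat) : Bool :=
  (cs.getD j ' ' == '[') && (pvBal (cs.take j) == v)

-- the common result shape both programs reduce to
def pvResult (cs : List Char) (o : Option Nat) : Option String :=
  match o with
  | none => none
  | some j =>
    if 0 < j ∧ cs.getD (j - 1) ' ' = '#' then some (String.ofList (cs.take (j - 1)))
    else none

lemma pvPred_false_of_not_open (cs : List Char) (v : Int) (j : Nat)
    (h : cs.getD j ' ' ≠ '[') : pvPred cs v j = false := by
  have hb : (cs.getD j ' ' == '[') = false := beq_eq_false_iff_ne.mpr h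
  simp only [pvPred]
  rw [hb, Bool.false_and]

lemma pvPred_iff (cs : List Char) (j : Nat) :
    pvPred cs (pvBal cs) j = true ↔ (cs.getD j ' ' = '[' ∧ pvBal (cs.drop j) = 0) := by
  have htot : pvBal cs = pvBal (cs.take j) + pvBal (cs.drop j) := by
    rw [← pvBal_append, List.take_append_drop]
  simp only [pvPred, Bool.and_eq_true, beq_iff_eq]
  constructor
  · rintro ⟨h1, h2⟩; exact ⟨h1, by omega⟩
  · rintro ⟨h1, h2⟩; exact ⟨h1, by omega⟩

lemma pvBal_drop (cs : List Char) (i : Nat) (h : i < cs.length) :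
    pvBal (cs.drop i) = (if cs.getD i ' ' = '[' then 1 else if cs.getD i ' ' = ']' then -1 else 0) + pvBal (cs.drop (i + 1)) := by
  rw [List.drop_eq_getElem_cons h, List.getD_eq_getElem cs ' ' h]
  rfl

-- A-side: the backward depth-tracking loop is a backward search for pvPred
lemma pvLoopA_eq (cs : List Char) :
    ∀ i, i < cs.length → ∀ depth, depth = -(pvBal (cs.drop (i + 1))) →
      pvLoopA cs i depth
        = pvResult cs (((List.range (i + 1)).reverse).find? (pvPred cs (pvBal cs))) := by
  intro i
  induction i using Nat.strong_induction_on with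
  | _ i ih =>
    intro hi depth hd
    rw [List.range_succ, List.reverse_append, List.reverse_singleton, List.singleton_append,
        List.find?_cons]
    have hbd := pvBal_drop cs i hi
    rw [pvLoopA]
    by_cases hc1 : cs.getD i ' ' = ']'
    · have hδ : pvBal (cs.drop i) = -1 + pvBal (cs.drop (i + 1)) := by
        rw [hbd, hc1]; simp
      rw [pvPred_false_of_not_open cs _ i (by intro h; rw [h] at hc1; exact absurd hc1 (by decide))]
      simp only [hc1, if_true]
      by_cases hi0 : i = 0
      · subst hi0; simp [pvResult]
      · rw [if_neg hi0]
        have hii : i - 1 + 1 = i := by omega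
        have := ih (i - 1) (by omega) (by omega) (depth + 1) (by rw [hii]; omega)
        rw [this, hii]
    · by_cases hc2 : cs.getD i ' ' = '['
      · have hδ : pvBal (cs.drop i) = 1 + pvBal (cs.drop (i + 1)) := by
          rw [hbd, hc2]; simp
        rw [if_neg (by rw [hc2]; decide), if_pos hc2]
        by_cases hz : pvBal (cs.drop i) = 0
        · rw [(pvPred_iff cs i).2 ⟨hc2, hz⟩]
          rw [if_pos (by omega : depth - 1 = 0)]
          rfl
        · have hpred : pvPred cs (pvBal cs) i = false := by
            rw [Bool.eq_false_iff]; intro hcon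
            exact hz ((pvPred_iff cs i).1 hcon).2
          rw [hpred, if_neg (by omega : ¬ (depth - 1 = 0))]
          by_cases hi0 : i = 0
          · subst hi0; simp [pvResult]
          · rw [if_neg hi0]
            have hii : i - 1 + 1 = i := by omega
            have := ih (i - 1) (by omega) (by omega) (depth - 1) (by rw [hii]; omega)
            rw [this, hii]
      · have hδ : pvBal (cs.drop i) = pvBal (cs.drop (i + 1)) := by
          rw [hbd, if_neg hc2, if_neg hc1]; ring
        rw [if_neg hc1, if_neg hc2, pvPred_false_of_not_open cs _ i hc2]
        by_cases hi0 : i = 0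
        · subst hi0; simp [pvResult]
        · rw [if_neg hi0]
          have hii : i - 1 + 1 = i := by omega
          have := ih (i - 1) (by omega) (by omega) depth (by rw [hii]; omega)
          rw [this, hii]

-- reversed index range of a cons splits into the shifted tail range and the head index
lemma pvRangeRevSplit (n : Nat) (p : Nat → Bool) :
    ((List.range (n + 1)).reverse).find? p
      = (((((List.range n).reverse).find? (fun j => p (j + 1))).map (fun j => j + 1)).or
          (if p 0 then some 0 else none)) := by
  rw [List.range_succ_eq_map, List.reverse_cons, List.find?_append, ← List.map_reverse,
      List.find?_map]
  rcases h0 : p 0 with _ | _ <;> simp [List.find?, h0, Function.comp_def, Nat.succ_eq_add_one]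

-- B-side: after the forward fold, bal is the total balance and the dictionary answers
-- any key v with the LAST '[' whose prefix balance is v (searched here from the right)
lemma pvFoldB_eq (v : Int) : ∀ (cs : List Char) (s : Int) (d : PySem.Dict Int Int) (b : Int),
    ((((PySem.List.enumerate cs s).foldl pvStepB (d, b)).1.get? v
        = ((((List.range cs.length).reverse).find? (fun j => (cs.getD j ' ' == '[') && (b + pvBal (cs.take j) == v))).map (fun (j : Nat) => s + (j : Int))).or (d.get? v))
    ∧ ((PySem.List.enumerate cs s).foldl pvStepB (d, b)).2 = b + pvBal cs) := by
  intro cs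
  induction cs with
  | nil =>
    intro s d b
    simp [PySem.List.enumerate_nil, pvBal]
  | cons c t ih =>
    intro s d b
    rw [PySem.List.enumerate_cons, List.foldl_cons]
    have hδ : pvBal (c :: t) = (if c = '[' then 1 else if c = ']' then -1 else 0) + pvBal t := rfl
    have hstep : pvStepB (d, b) (s, c)
        = ((if c = '[' then d.insert b s else d), b + (if c = '[' then 1 else if c = ']' then -1 else 0)) := by
      simp only [pvStepB]
      split_ifs <;> simp <;> try ring
    rw [hstep]
    obtain ⟨ih1, ih2⟩ := ih (s + 1) (if c = '[' then d.insert b s else d)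
      (b + (if c = '[' then 1 else if c = ']' then -1 else 0))
    constructor
    · rw [ih1, List.length_cons, pvRangeRevSplit]
      have hpred : (fun j => ((c :: t).getD (j + 1) ' ' == '[')
            && (b + pvBal ((c :: t).take (j + 1)) == v))
          = (fun j => (t.getD j ' ' == '[')
            && (b + (if c = '[' then 1 else if c = ']' then -1 else 0) + pvBal (t.take j) == v)) := by
        funext j
        have : b + pvBal ((c :: t).take (j + 1))
            = b + (if c = '[' then 1 else if c = ']' then -1 else 0) + pvBal (t.take j) := by
          rw [List.take_succ_cons]
          show b + ((if c = '[' then 1 else if c = ']' then -1 else 0) + pvBal (t.take j)) = _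
          ring
        rw [List.getD_cons_succ, this]
      rw [hpred, Option.map_or, Option.map_map, Option.or_assoc]
      congr 1
      · congr 1
        funext j
        simp only [Function.comp_apply]
        push_cast
        ring_nf
      · have hhead : (((c :: t).getD 0 ' ' == '[') && (b + pvBal ((c :: t).take 0) == v))
            = ((c == '[') && (b == v)) := by
          simp [pvBal]
        rw [hhead]
        by_cases hopen : c = '['
        · rw [if_pos hopen, PySem.Dict.get?_insert]
          by_cases hv : b = v
          · simp [hopen, hv]
          · have : ((c == '[') && (b == v)) = false := by
              rw [hopen]; simp [hv]
            rw [this]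
            simp [Ne.symm hv]
        · have : ((c == '[') && (b == v)) = false := by
            simp [hopen]
          rw [this, if_neg hopen]
          simp
    · rw [ih2, hδ]; ring

theorem strip_trailing_php_attribute_py_spec_aux (head : String) :
    strip_trailing_php_attribute_py head = strip_trailing_php_attribute_py_alt head := by
  rw [strip_trailing_php_attribute_py, strip_trailing_php_attribute_py_alt]
  by_cases hend : PySem.Str.endswith head "]" = true
  · rw [if_pos hend, if_pos hend]
    have hne : head.toList ≠ [] := by
      have := (PySem.Chars.endswith_iff head.toList "]".toList).1 (by
        rw [← PySem.Str.endswith_eq]; exact hend)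
      intro h
      rw [h] at this
      simp at this
    set cs := head.toList with hcs
    have hlen : 0 < cs.length := List.length_pos_of_ne_nil hne
    rw [if_neg (by omega : ¬ cs.length = 0)]
    -- A side
    have hA := pvLoopA_eq cs (cs.length - 1) (by omega) 0 (by
      rw [Nat.sub_add_cancel (by omega : 1 ≤ cs.length)]
      rw [List.drop_of_length_le (le_refl _)]
      rfl)
    rw [Nat.sub_add_cancel (by omega : 1 ≤ cs.length)] at hA
    rw [hA]
    -- B side
    obtain ⟨hB1, hB2⟩ := pvFoldB_eq ((((PySem.List.enumerate cs 0).foldl pvStepB (PySem.Dict.empty, 0))).2) cs 0 PySem.Dict.empty 0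
    have hpred : (fun j => ((cs.getD j ' ' == '[') && ((0 : Int) + pvBal (cs.take j) == 0 + pvBal cs)))
        = pvPred cs (pvBal cs) := by
      funext j
      rw [pvPred]
      norm_num
    rw [hB2] at hB1
    rw [hpred] at hB1
    rw [pvFinishB, hB2, hB1]
    rcases hfind : ((List.range cs.length).reverse).find? (pvPred cs (pvBal cs)) with _ | j
    · rfl
    · simp only [Option.map_some, PySem.Dict.get?_empty, Option.or_none]
      rcases j with _ | k
      -- j = 0 : both guards are false
      · rw [pvResult]
        norm_num
      · rw [pvResult]
        have h1 : (0 : Int) + ((k + 1 : Nat) : Int) - 1 = (k : Nat) := by push_cast; ring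
        rw [h1]
        have h2 : PySem.List.pyGetD cs ((k : Nat) : Int) ' ' = cs.getD k ' ' := by
          simp [PySem.List.pyGetD_natCast]
        have h3 : PySem.List.slice cs none (some ((k : Nat) : Int)) = cs.take k := by
          simp [PySem.List.slice_to_natCast]
        rw [h2, h3]
        norm_num
  · rw [if_neg hend, if_neg hend]

-- ===== VERDICT (by name: the statement is the Claim_ definition above) =====
theorem strip_trailing_php_attribute_py_spec : Claim_equal_strip_trailing_php_attribute_py := by
  intro head _
  exact strip_trailing_php_attribute_py_spec_aux head
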